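-- pv_equiv track=rewrite | github.com/adsnash/vrt-editor | vrt/edit.py | _update_ordered_dict
-- ===== SOURCE A (Python) =====
-- def _update_ordered_dict(ordered_dict, input_dict_list, key_add_after):
-- 	"""
-- 	method to update an ordered dict given input dict list and desired key to add values after
-- 	NOTE: key_add_after is the key to add input_dict after (everything AFTER that will be shifted back)
-- 	"""
-- 	new_dict = ordered_dict.copy()
-- 	key_list = list(new_dict.keys())
-- 	pop_keys = key_list[key_list.index(key_add_after)+1: ]
-- 	pop_dict_list = input_dict_list + [{key: new_dict.pop(key)} for key in pop_keys]
-- 	for key_val_dict in pop_dict_list: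
-- 		new_dict.update(key_val_dict)
-- 	return new_dict
-- ===== SOURCE B (Python) =====
-- def _update_ordered_dict(ordered_dict, input_dict_list, key_add_after):
--     """Single forward pass: copy entries in order and splice the input dicts
--     right after key_add_after; later writes of original suffix keys overwrite
--     in place, which reproduces the pop/re-insert position semantics."""
--     result = ordered_dict.copy()
--     result.clear()
--     found = False
--     for key, val in ordered_dict.items():
--         result[key] = val
--         if key == key_add_after:
--             found = True
--             for d in input_dict_list:
--                 result.update(d)
--     if not found:
--         raise ValueError(f"{key_add_after!r} is not in list")
--     return result
-- ===== Notes on version B (the rewrite author's own statement) =====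
-- stated objective: alternative
-- what changed: A finds the key's index, pops every suffix key into singleton dicts and re-applies them after the inserted dicts; B is one forward pass over the items that splices the input dicts in right after key_add_after, relying on in-place overwrite to keep suffix positions.
import Mathlib
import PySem

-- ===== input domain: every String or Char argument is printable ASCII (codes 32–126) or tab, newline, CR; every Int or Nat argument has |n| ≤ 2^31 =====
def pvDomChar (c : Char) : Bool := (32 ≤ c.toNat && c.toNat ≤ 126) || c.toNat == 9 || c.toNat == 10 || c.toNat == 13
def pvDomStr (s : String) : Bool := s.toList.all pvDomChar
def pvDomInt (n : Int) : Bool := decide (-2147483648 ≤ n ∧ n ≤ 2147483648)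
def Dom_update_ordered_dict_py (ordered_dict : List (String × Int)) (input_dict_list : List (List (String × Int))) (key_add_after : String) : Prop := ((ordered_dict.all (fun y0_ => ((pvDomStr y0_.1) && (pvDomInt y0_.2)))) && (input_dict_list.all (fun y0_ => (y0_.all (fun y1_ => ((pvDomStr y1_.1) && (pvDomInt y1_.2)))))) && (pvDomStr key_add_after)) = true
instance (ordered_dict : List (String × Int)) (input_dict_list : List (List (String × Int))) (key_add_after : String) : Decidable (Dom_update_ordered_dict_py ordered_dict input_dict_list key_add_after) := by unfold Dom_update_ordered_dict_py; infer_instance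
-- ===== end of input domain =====

-- B builds the result in one forward pass that splices the input dicts in right after
-- key_add_after, instead of A's index-find + pop-suffix + list-concat + re-update (alternative
-- decomposition, same asymptotic cost); equal return value on every input where A returns.

-- ===== PORT A =====
-- helper: the body of A's dict comprehension '{key: new_dict.pop(key)} for key in pop_keys',
-- which mutates new_dict while building the list of singleton dicts (carried as a pair)
def popStepA (st : PySem.Dict String Int × List (List (String × Int))) (k : String) :
    PySem.Dict String Int × List (List (String × Int)) :=
  match st.1.pop? k with
  | some (v, d') => (d', st.2 ++ [[(k, v)]])
  | none => st  -- unreachable: k is one of the dict's own keys (dict.pop cannot raise here)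

def update_ordered_dict_py (ordered_dict : List (String × Int)) (input_dict_list : List (List (String × Int))) (key_add_after : String) : List (String × Int) :=
  let new_dict : PySem.Dict String Int := PySem.Dict.ofList ordered_dict
  let key_list := new_dict.keys
  match PySem.List.index? key_list key_add_after with
  | none => []  -- key_list.index(key_add_after) raises ValueError: excluded by Pre_
  | some i =>
    let pop_keys := PySem.List.slice key_list (some ((i : Int) + 1)) none
    let st := pop_keys.foldl popStepA (new_dict, ([] : List (List (String × Int))))
    let pop_dict_list := input_dict_list ++ st.2
    (pop_dict_list.foldl (fun d kv => d.update kv) st.1).items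

-- ===== PORT B =====
-- helper: B's loop body — write the entry, and on hitting key_add_after apply all input dicts
def stepB (input_dict_list : List (List (String × Int))) (key_add_after : String)
    (st : PySem.Dict String Int × Bool) (kv : String × Int) :
    PySem.Dict String Int × Bool :=
  let r := st.1.insert kv.1 kv.2
  if kv.1 == key_add_after then
    (input_dict_list.foldl (fun d l => d.update l) r, true)
  else (r, st.2)

def update_ordered_dict_py_alt (ordered_dict : List (String × Int)) (input_dict_list : List (List (String × Int))) (key_add_after : String) : List (String × Int) :=
  let st := (PySem.Dict.ofList ordered_dict).items.foldl
    (stepB input_dict_list key_add_after) (PySem.Dict.empty, false)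
  -- Python raises ValueError when st.2 = false (key absent): excluded by Pre_
  st.1.items

-- ===== PRECONDITION & SPEC =====
-- Pre_ excludes exactly the inputs where key_add_after is not a key of ordered_dict, on which
-- A raises ValueError (and B does too).
def Pre_update_ordered_dict_py (ordered_dict : List (String × Int)) (input_dict_list : List (List (String × Int))) (key_add_after : String) : Prop :=
  key_add_after ∈ ordered_dict.map Prod.fst
instance (ordered_dict : List (String × Int)) (input_dict_list : List (List (String × Int))) (key_add_after : String) : Decidable (Pre_update_ordered_dict_py ordered_dict input_dict_list key_add_after) := by unfold Pre_update_ordered_dict_py; infer_instance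

def pvWitness_update_ordered_dict_py : (List (String × Int)) × (List (List (String × Int))) × String :=
  ([("a", 1), ("b", 2)], [[("c", 3)]], "a")

def Spec_update_ordered_dict_py (ordered_dict : List (String × Int)) (input_dict_list : List (List (String × Int))) (key_add_after : String) (out : List (String × Int)) : Prop := out = update_ordered_dict_py_alt ordered_dict input_dict_list key_add_after
instance (ordered_dict : List (String × Int)) (input_dict_list : List (List (String × Int))) (key_add_after : String) (out : List (String × Int)) : Decidable (Spec_update_ordered_dict_py ordered_dict input_dict_list key_add_after out) := by unfold Spec_update_ordered_dict_py; infer_instance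

-- ===== CLAIM (what is proved, stated in full; the proofs are below) =====
def Claim_equal_update_ordered_dict_py : Prop := ∀ (ordered_dict : List (String × Int)) (input_dict_list : List (List (String × Int))) (key_add_after : String), Dom_update_ordered_dict_py ordered_dict input_dict_list key_add_after → Pre_update_ordered_dict_py ordered_dict input_dict_list key_add_after → Spec_update_ordered_dict_py ordered_dict input_dict_list key_add_after (update_ordered_dict_py ordered_dict input_dict_list key_add_after)

-- ===== LEMMAS AND PROOFS =====

-- first occurrence: list.index on keys of the decomposed items list
lemma idxOf?_first (key : String) : ∀ (ks rest : List String), key ∉ ks →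
    List.idxOf? key (ks ++ key :: rest) = some ks.length := by
  intro ks rest h
  induction ks with
  | nil => simp [List.idxOf?, List.findIdx?_cons]
  | cons a t ih =>
      simp only [List.mem_cons, not_or] at h
      have ha : (a == key) = false := beq_eq_false_iff_ne.mpr (Ne.symm h.1)
      have ht := ih h.2
      simp only [List.idxOf?] at ht ⊢
      simp [List.findIdx?_cons, ha, ht]

-- any occurrence of key among the items splits them at the FIRST occurrence
lemma decomp_first (key : String) : ∀ (l : List (String × Int)), key ∈ l.map Prod.fst →
    ∃ pre v suf, l = pre ++ (key, v) :: suf ∧ key ∉ pre.map Prod.fst := by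
  intro l h
  induction l with
  | nil => simp at h
  | cons a t ih =>
      by_cases hk : a.1 = key
      · exact ⟨[], a.2, t, by simp [← hk], by simp⟩
      · have h' : key ∈ List.map Prod.fst t := by
          rcases List.mem_map.mp h with ⟨p, hp, hfst⟩
          rcases List.mem_cons.mp hp with rfl | hp'
          · exact absurd hfst hk
          · exact List.mem_map.mpr ⟨p, hp', hfst⟩
        rcases ih h' with ⟨pre, v, suf, h1, h2⟩
        refine ⟨a :: pre, v, suf, by simp [h1], ?_⟩
        simp only [List.map_cons, List.mem_cons, not_or]
        exact ⟨fun e => hk e.symm, h2⟩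

-- A's pop loop: popping the suffix keys strips the suffix and collects its singleton dicts
lemma popLoop : ∀ (suf pre : List (String × Int)) (acc : List (List (String × Int))),
    ((pre ++ suf).map Prod.fst).Nodup →
    (suf.map Prod.fst).foldl popStepA (⟨pre ++ suf⟩, acc)
      = (⟨pre⟩, acc ++ suf.map (fun p => [p])) := by
  intro suf
  induction suf with
  | nil => intro pre acc _; simp
  | cons a t ih =>
      intro pre acc hnd
      have h2 : (a.1 :: (pre.map Prod.fst ++ t.map Prod.fst)).Nodup := by
        rw [← List.nodup_middle]; simpa using hnd
      have hnd' : ((pre ++ t).map Prod.fst).Nodup := by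
        rw [List.map_append]; exact (List.nodup_cons.mp h2).2
      have hka : a.1 ∉ pre.map Prod.fst ++ t.map Prod.fst := (List.nodup_cons.mp h2).1
      have hka1 : a.1 ∉ pre.map Prod.fst := fun hc => hka (List.mem_append.mpr (Or.inl hc))
      have hka2 : a.1 ∉ t.map Prod.fst := fun hc => hka (List.mem_append.mpr (Or.inr hc))
      have hp : ∀ p ∈ pre, (!(p.1 == a.1)) = true := by
        intro p hp
        rw [Bool.not_eq_true', beq_eq_false_iff_ne]
        exact fun hc => hka1 (List.mem_map.mpr ⟨p, hp, hc⟩)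
      have ht2 : ∀ p ∈ t, (!(p.1 == a.1)) = true := by
        intro p hp
        rw [Bool.not_eq_true', beq_eq_false_iff_ne]
        exact fun hc => hka2 (List.mem_map.mpr ⟨p, hp, hc⟩)
      have hget : (⟨pre ++ a :: t⟩ : PySem.Dict String Int).get? a.1 = some a.2 := by
        apply PySem.Dict.get?_of_mem_items
        · simp
        · simpa [PySem.Dict.keys] using hnd
      have herase : (⟨pre ++ a :: t⟩ : PySem.Dict String Int).erase a.1 = ⟨pre ++ t⟩ := by
        simp only [PySem.Dict.erase]
        congr 1
        rw [List.filter_append, List.filter_cons, List.filter_eq_self.mpr hp,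
          List.filter_eq_self.mpr ht2]
        simp
      have hstep : popStepA (⟨pre ++ a :: t⟩, acc) a.1 = (⟨pre ++ t⟩, acc ++ [[(a.1, a.2)]]) := by
        simp [popStepA, PySem.Dict.pop?, hget, herase]
      simp only [List.map_cons, List.foldl_cons, hstep, ih pre (acc ++ [[(a.1, a.2)]]) hnd']
      simp

-- B's loop on entries whose key is not key_add_after is a plain insert loop
lemma foldB_noKey (inputs : List (List (String × Int))) (key : String) :
    ∀ (l : List (String × Int)) (st : PySem.Dict String Int × Bool), key ∉ l.map Prod.fst →
    l.foldl (stepB inputs key) st = (l.foldl (fun d p => d.insert p.1 p.2) st.1, st.2) := by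
  intro l
  induction l with
  | nil => intro st _; rfl
  | cons a t ih =>
      intro st h
      simp only [List.map_cons, List.mem_cons, not_or] at h
      have : (a.1 == key) = false := beq_eq_false_iff_ne.mpr (Ne.symm h.1)
      simp only [List.foldl_cons, stepB, this]
      exact ih _ h.2

-- inserting distinct fresh keys into the empty dict rebuilds exactly that items list
lemma foldl_insert_mk (pre : List (String × Int)) (hnd : (pre.map Prod.fst).Nodup) :
    pre.foldl (fun d p => d.insert p.1 p.2) PySem.Dict.empty = (⟨pre⟩ : PySem.Dict String Int) := by
  apply PySem.Dict.ext
  rw [PySem.Dict.items_foldl_insert_fresh pre Prod.fst Prod.snd _ (by intro a _; rfl) hnd]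
  simp [PySem.Dict.empty]

-- ===== VERDICT (by name: the statement is the Claim_ definition above) =====
-- membership in the pairs' keys survives building the dict
lemma mem_keys_foldl (x : String) : ∀ (ps : List (String × Int)) (d : PySem.Dict String Int),
    x ∈ ps.map Prod.fst ∨ x ∈ d.keys →
    x ∈ (ps.foldl (fun acc p => acc.insert p.1 p.2) d).keys := by
  intro ps
  induction ps with
  | nil => intro d h; simpa using h
  | cons a t ih =>
      intro d h
      simp only [List.foldl_cons]
      apply ih
      rcases h with h | h
      · rw [List.map_cons] at h
        rcases List.mem_cons.mp h with h0 | h0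
        · exact Or.inr ((PySem.Dict.mem_keys_insert _ _ _ _).mpr (Or.inl h0))
        · exact Or.inl h0
      · exact Or.inr ((PySem.Dict.mem_keys_insert _ _ _ _).mpr (Or.inr h))

-- ===== VERDICT (by name: the statement is the Claim_ definition above) =====
theorem update_ordered_dict_py_spec : Claim_equal_update_ordered_dict_py := by
  intro od idl key _hdom hpre
  unfold Spec_update_ordered_dict_py
  have hknd : (PySem.Dict.ofList od).keys.Nodup := PySem.Dict.nodup_keys_ofList od
  have hmemk : key ∈ (PySem.Dict.ofList od).keys := by
    have : PySem.Dict.ofList od = od.foldl (fun acc p => acc.insert p.1 p.2) PySem.Dict.empty := rfl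
    rw [this]
    exact mem_keys_foldl key od PySem.Dict.empty (Or.inl hpre)
  have hmem : key ∈ (PySem.Dict.ofList od).items.map Prod.fst := hmemk
  rcases decomp_first key (PySem.Dict.ofList od).items hmem with ⟨pre, v, suf, hl, hnp⟩
  have hnd : ((pre ++ (key, v) :: suf).map Prod.fst).Nodup := by
    have := hknd
    rw [show (PySem.Dict.ofList od).keys = (PySem.Dict.ofList od).items.map Prod.fst from rfl,
      hl] at this
    exact this
  have hnd2 : (pre.map Prod.fst ++ key :: suf.map Prod.fst).Nodup := by
    simpa using hnd
  have hpre_nd : (pre.map Prod.fst).Nodup := (List.nodup_append.mp hnd2).1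
  have hsufk : key ∉ suf.map Prod.fst :=
    (List.nodup_cons.mp (List.nodup_append.mp hnd2).2.1).1
  have hkeys : (PySem.Dict.ofList od).keys = pre.map Prod.fst ++ key :: suf.map Prod.fst := by
    rw [show (PySem.Dict.ofList od).keys = (PySem.Dict.ofList od).items.map Prod.fst from rfl, hl]
    simp
  have hidx : PySem.List.index? (PySem.Dict.ofList od).keys key
      = some (pre.map Prod.fst).length := by
    rw [show PySem.List.index? (PySem.Dict.ofList od).keys key
        = List.idxOf? key (PySem.Dict.ofList od).keys from rfl, hkeys]
    exact idxOf?_first key (pre.map Prod.fst) (suf.map Prod.fst) hnp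
  have hslice : PySem.List.slice (PySem.Dict.ofList od).keys
      (some (((pre.map Prod.fst).length : Int) + 1)) none = suf.map Prod.fst := by
    rw [PySem.List.slice_from (PySem.Dict.ofList od).keys
      (a := ((pre.map Prod.fst).length : Int) + 1) (by omega)]
    rw [show (((pre.map Prod.fst).length : Int) + 1).toNat = (pre.map Prod.fst ++ [key]).length
      by simp]
    rw [hkeys, show pre.map Prod.fst ++ key :: suf.map Prod.fst
      = (pre.map Prod.fst ++ [key]) ++ suf.map Prod.fst by simp]
    exact List.drop_left
  have hD : PySem.Dict.ofList od = (⟨(pre ++ [(key, v)]) ++ suf⟩ : PySem.Dict String Int) := by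
    apply PySem.Dict.ext; simpa using hl
  have hpop : (suf.map Prod.fst).foldl popStepA (PySem.Dict.ofList od, [])
      = ((⟨pre ++ [(key, v)]⟩ : PySem.Dict String Int), [] ++ suf.map (fun p => [p])) := by
    rw [hD]
    exact popLoop suf (pre ++ [(key, v)]) [] (by simpa [List.append_assoc] using hnd)
  have hcont : (⟨pre⟩ : PySem.Dict String Int).contains key = false := by
    simp only [PySem.Dict.contains, List.any_eq_false]
    intro p hp
    simp only [beq_iff_eq]
    exact fun hc => hnp (List.mem_map.mpr ⟨p, hp, hc⟩)
  have hins : (⟨pre⟩ : PySem.Dict String Int).insert key v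
      = (⟨pre ++ [(key, v)]⟩ : PySem.Dict String Int) := by
    apply PySem.Dict.ext
    rw [PySem.Dict.items_insert_of_not_contains _ _ hcont]
  have hA : update_ordered_dict_py od idl key
      = (suf.foldl (fun d p => d.insert p.1 p.2)
          (idl.foldl (fun d kv => d.update kv)
            (⟨pre ++ [(key, v)]⟩ : PySem.Dict String Int))).items := by
    simp only [update_ordered_dict_py, hidx, hslice]
    rw [hpop]
    simp only [List.nil_append]
    rw [List.foldl_append, List.foldl_map]
    rfl
  have hB : update_ordered_dict_py_alt od idl key
      = (suf.foldl (fun d p => d.insert p.1 p.2)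
          (idl.foldl (fun d kv => d.update kv)
            (⟨pre ++ [(key, v)]⟩ : PySem.Dict String Int))).items := by
    simp only [update_ordered_dict_py_alt, hl]
    rw [List.foldl_append, foldB_noKey idl key pre _ hnp, List.foldl_cons]
    simp only [stepB, beq_self_eq_true, if_pos]
    rw [foldl_insert_mk pre hpre_nd, hins, foldB_noKey idl key suf _ hsufk]
  rw [hA, hB]
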